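-- pv_equiv track=rewrite | github.com/reynaldesgr/praticing-gen-words | gen-words.py | gen_words
-- ===== SOURCE A (Python) =====
-- def gen_words(alphabet, k, w):
--     if len(w) == k:
--         yield w
--     else:
--         for l in alphabet:
--             w+=l
--             yield from gen_words(alphabet, k, w)
--             w = w[:len(w) - 1]
-- ===== SOURCE B (Python) =====
-- def gen_words(alphabet, k, w):
--     # Closed-form enumeration: the i-th word is w plus the length-n base-m
--     # numeral of i (big-endian digits indexing into alphabet); no recursion,
--     # no backtracking state.
--     n = k - len(w)
--     m = len(alphabet)
--     for i in range(m ** n):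
--         digits = []
--         x = i
--         for _ in range(n):
--             x, d = divmod(x, m)
--             digits.append(alphabet[d])
--         yield w + ''.join(reversed(digits))
-- ===== Notes on version B (the rewrite author's own statement) =====
-- stated objective: alternative
-- what changed: Replaces A's recursive depth-first backtracking generator (append a letter, recurse, pop one char) with a closed-form mixed-radix enumeration: the i-th output is w plus the length-n base-m numeral of i with digits indexing into the alphabet, preserving lexicographic order with no recursion or backtracking state.
-- outside the precondition, e.g. on gen_words(['ab', 'c'], 2, ''): A returns ['ab', 'ac'], B returns ['abab', 'abc', 'cab', 'cc']; on gen_words([], 0, 'x'): A returns [], B raises ZeroDivisionError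
import Mathlib
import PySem

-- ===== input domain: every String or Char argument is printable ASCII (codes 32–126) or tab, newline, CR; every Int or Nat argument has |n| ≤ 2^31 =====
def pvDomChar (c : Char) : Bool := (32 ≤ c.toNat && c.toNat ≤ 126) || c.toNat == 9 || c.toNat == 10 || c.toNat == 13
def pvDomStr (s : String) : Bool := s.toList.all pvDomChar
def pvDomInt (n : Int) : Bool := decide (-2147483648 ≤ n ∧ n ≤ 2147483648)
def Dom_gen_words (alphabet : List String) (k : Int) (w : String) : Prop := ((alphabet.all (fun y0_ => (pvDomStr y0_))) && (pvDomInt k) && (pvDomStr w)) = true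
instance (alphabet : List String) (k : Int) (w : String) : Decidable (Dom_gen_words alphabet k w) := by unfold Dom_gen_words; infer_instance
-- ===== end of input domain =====

-- B replaces A's recursive backtracking generator by a closed-form mixed-radix
-- enumeration (word i = w + the length-n base-m numeral of i over the alphabet),
-- same words in the same lexicographic order; equal on Pre_.


-- ===== PORT A =====
-- Fuel-indexed transliteration of A's recursion; the loop body carries the
-- mutable w through the fold: w += l, recurse, then w = w[:len(w)-1]
-- (String.ofList ·.toList.dropLast is exact for Python's w[:len(w)-1], also on "").
-- Fuel (k - len w).toNat suffices on every input Pre_ admits.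
def genA (alphabet : List String) (k : Int) : Nat → String → List String
  | 0, w => if (w.length : Int) = k then [w] else []
  | fuel+1, w =>
    if (w.length : Int) = k then [w]
    else
      (alphabet.foldl
        (fun (p : String × List String) l =>
          let w2 := p.1 ++ l
          (String.ofList w2.toList.dropLast, p.2 ++ genA alphabet k fuel w2))
        (w, ([] : List String))).2

def gen_words (alphabet : List String) (k : Int) (w : String) : List String :=
  genA alphabet k (k - (w.length : Int)).toNat w

-- ===== PORT B =====
-- Source B's inner loop 'for _ in range(n): x, d = divmod(x, m); digits.append(alphabet[d])'
-- (x ≥ 0 and m > 0 whenever the loop runs, so Nat division is exact Python divmod;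
-- d = x % m < m is always in range, so getD never takes its default on reached inputs).
def bdigits (alphabet : List String) (m : Nat) : Nat → Nat → List String → List String
  | 0, _, digits => digits
  | t+1, x, digits => bdigits alphabet m t (x / m) (digits ++ [alphabet.getD (x % m) ""])

-- Source B: n = k - len(w); m = len(alphabet); the i-th word for i in range(m ** n) is
-- w + ''.join(reversed(digits)).  (Outside Pre_ Source B raises before this loop.)
def gen_words_alt (alphabet : List String) (k : Int) (w : String) : List String :=
  let n := (k - (w.length : Int)).toNat
  let m := alphabet.length
  (List.range (m ^ n)).map
    (fun i => w ++ String.join ((bdigits alphabet m n i []).reverse))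

-- ===== PRECONDITION & SPEC =====
-- Pre_ excludes len(w) > k (A recurses forever: RecursionError; B raises at range(m ** n))
-- and alphabets with a non-single-character entry when len(w) < k: on those A usually also
-- recurses forever, and on the reachability-dependent slice where it does return, its words
-- are an accident of the single-character pop w[:len(w)-1] after a multi-character (or
-- empty) append.
def Pre_gen_words (alphabet : List String) (k : Int) (w : String) : Prop :=
  (w.length : Int) ≤ k ∧ ((w.length : Int) = k ∨ ∀ l ∈ alphabet, l.length = 1)
instance (alphabet : List String) (k : Int) (w : String) : Decidable (Pre_gen_words alphabet k w) := by unfold Pre_gen_words; infer_instance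

def pvWitness_gen_words : List String × Int × String := (["a", "b"], 2, "")

def Spec_gen_words (alphabet : List String) (k : Int) (w : String) (out : List String) : Prop := out = gen_words_alt alphabet k w
instance (alphabet : List String) (k : Int) (w : String) (out : List String) : Decidable (Spec_gen_words alphabet k w out) := by unfold Spec_gen_words; infer_instance

-- ===== CLAIM (what is proved, stated in full; the proofs are below) =====
def Claim_equal_gen_words : Prop := ∀ (alphabet : List String) (k : Int) (w : String), Dom_gen_words alphabet k w → Pre_gen_words alphabet k w → Spec_gen_words alphabet k w (gen_words alphabet k w)

-- ===== LEMMAS AND PROOFS =====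

-- one breadth-first round: extend every word by every letter (the common shape
-- both sides are reduced to)
def bstep (alphabet : List String) (ws : List String) : List String :=
  ws.flatMap (fun p => alphabet.map (fun l => p ++ l))

lemma bstep_append (alphabet : List String) (xs ys : List String) :
    bstep alphabet (xs ++ ys) = bstep alphabet xs ++ bstep alphabet ys := by
  simp [bstep]

lemma bstep_iter_append (alphabet : List String) :
    ∀ (n : Nat) (xs ys : List String),
      (bstep alphabet)^[n] (xs ++ ys) = (bstep alphabet)^[n] xs ++ (bstep alphabet)^[n] ys := by
  intro n
  induction n with
  | zero => intro xs ys; simp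
  | succ m ih =>
    intro xs ys
    simp [Function.iterate_succ_apply, bstep_append, ih]

lemma bstep_iter_nil (alphabet : List String) :
    ∀ n : Nat, (bstep alphabet)^[n] ([] : List String) = [] := by
  intro n
  induction n with
  | zero => simp
  | succ m ih => simp [Function.iterate_succ_apply, bstep, ih]

-- dropping the last char of w ++ l restores w when l is a single character
lemma dropLast_append_one (w l : String) (hl : l.length = 1) :
    (String.ofList (w ++ l).toList.dropLast) = w := by
  obtain ⟨c, hc⟩ : ∃ c, l.toList = [c] := by
    have : l.toList.length = 1 := hl
    match h : l.toList with
    | [c] => exact ⟨c, rfl⟩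
    | [] => simp [h] at this
    | c :: d :: t => simp [h] at this
  have : (w ++ l).toList = w.toList ++ [c] := by
    simp [hc]
  rw [this, List.dropLast_concat]
  simp

-- the loop body of A, with the backtracking pop resolved
lemma foldl_loop (alphabet : List String) (k : Int) (f : Nat) :
    ∀ (al : List String), (∀ l ∈ al, l.length = 1) → ∀ (w : String) (acc : List String),
      (al.foldl
        (fun (p : String × List String) l =>
          let w2 := p.1 ++ l
          (String.ofList w2.toList.dropLast, p.2 ++ genA alphabet k f w2))
        (w, acc))
      = (w, acc ++ al.flatMap (fun l => genA alphabet k f (w ++ l))) := by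
  intro al
  induction al with
  | nil => intro _ w acc; simp
  | cons l rest ih =>
    intro h w acc
    have hl : l.length = 1 := h l (by simp)
    simp only [List.foldl_cons]
    rw [show (String.ofList (w ++ l).toList.dropLast : String) = w from dropLast_append_one w l hl]
    rw [ih (fun x hx => h x (by simp [hx])) w (acc ++ genA alphabet k f (w ++ l))]
    simp

lemma flatMap_congr_mem {α β : Type} (L : List α) (f g : α → List β)
    (h : ∀ x ∈ L, f x = g x) : L.flatMap f = L.flatMap g := by
  induction L with
  | nil => rfl
  | cons a t ih =>
    simp only [List.flatMap_cons, h a (by simp), ih (fun x hx => h x (by simp [hx]))]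

lemma bstep_iter_eq_flatMap (alphabet : List String) (n : Nat) :
    ∀ (L : List String), (bstep alphabet)^[n] L = L.flatMap (fun x => (bstep alphabet)^[n] [x]) := by
  intro L
  induction L with
  | nil => simp [bstep_iter_nil]
  | cons a t ih =>
    rw [show a :: t = [a] ++ t from rfl, bstep_iter_append, ih]
    simp

-- A's recursion equals n breadth-first rounds
lemma genA_eq (alphabet : List String) (k : Int)
    (hlet : ∀ l ∈ alphabet, l.length = 1) :
    ∀ (n : Nat) (w : String), k = (w.length : Int) + n →
      genA alphabet k n w = (bstep alphabet)^[n] [w] := by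
  intro n
  induction n with
  | zero =>
    intro w hk
    simp only [Nat.cast_zero, add_zero] at hk
    simp [genA, hk.symm]
  | succ m ih =>
    intro w hk
    have hne : (w.length : Int) ≠ k := by omega
    rw [genA, if_neg hne, foldl_loop alphabet k m alphabet hlet w []]
    simp only [List.nil_append]
    have hrec : ∀ l ∈ alphabet, genA alphabet k m (w ++ l) = (bstep alphabet)^[m] [w ++ l] := by
      intro l hl
      apply ih
      have : (w ++ l).length = w.length + 1 := by
        simp [String.length_append, hlet l hl]
      rw [this]; push_cast; omega
    rw [Function.iterate_succ_apply]
    have hstep : bstep alphabet [w] = alphabet.map (fun l => w ++ l) := by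
      simp [bstep]
    rw [hstep]
    rw [flatMap_congr_mem alphabet _ _ hrec]
    rw [show (alphabet.flatMap fun l => (bstep alphabet)^[m] [w ++ l])
          = ((alphabet.map (fun l => w ++ l)).flatMap fun x => (bstep alphabet)^[m] [x]) by
        simp [List.flatMap_map]]
    rw [← bstep_iter_eq_flatMap]

-- ---- B side: the decoded levels are the same breadth-first rounds ----

lemma bdigits_acc (alphabet : List String) (m : Nat) :
    ∀ (t x : Nat) (acc : List String),
      bdigits alphabet m t x acc = acc ++ bdigits alphabet m t x [] := by
  intro t
  induction t with
  | zero => intro x acc; simp [bdigits]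
  | succ s ih =>
    intro x acc
    rw [bdigits, bdigits, ih (x / m) (acc ++ [alphabet.getD (x % m) ""]),
        ih (x / m) ([] ++ [alphabet.getD (x % m) ""])]
    simp

-- the decoded word for one index
def bdec (alphabet : List String) (w : String) (n : Nat) (i : Nat) : String :=
  w ++ String.join ((bdigits alphabet alphabet.length n i []).reverse)

lemma bdec_zero (alphabet : List String) (w : String) (i : Nat) :
    bdec alphabet w 0 i = w := by
  simp [bdec, bdigits, String.join]

lemma bdec_succ (alphabet : List String) (w : String) (n i : Nat) :
    bdec alphabet w (n+1) i
      = bdec alphabet w n (i / alphabet.length)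
        ++ alphabet.getD (i % alphabet.length) "" := by
  unfold bdec
  rw [bdigits, bdigits_acc]
  simp [String.join, String.append_assoc]

lemma map_range_getD (alphabet : List String) (p : String) :
    (List.range alphabet.length).map (fun d => p ++ alphabet.getD d "") = alphabet.map (fun l => p ++ l) := by
  apply List.ext_getElem
  · simp
  · intro i h1 h2
    have hi : i < alphabet.length := by simpa using h2
    simp [List.getD, List.getElem?_eq_getElem hi]

lemma range_mul_flatMap (b : Nat) (f : Nat → String) :
    ∀ a : Nat, (List.range (a * b)).map f
      = (List.range a).flatMap (fun j => (List.range b).map (fun d => f (j * b + d))) := by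
  intro a
  induction a with
  | zero => simp
  | succ s ih =>
    rw [Nat.succ_mul, List.range_add, List.map_append, ih, List.range_succ, List.flatMap_append]
    simp [List.map_map, Nat.add_comm]

-- one decoded level is one breadth-first round on the previous level
lemma bdec_level (alphabet : List String) (w : String) (n : Nat) :
    (List.range (alphabet.length ^ (n+1))).map (bdec alphabet w (n+1))
      = bstep alphabet ((List.range (alphabet.length ^ n)).map (bdec alphabet w n)) := by
  rcases Nat.eq_zero_or_pos alphabet.length with hm | hm
  · simp [pow_succ, bstep, List.flatMap_map, List.eq_nil_of_length_eq_zero hm]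
  · rw [pow_succ, range_mul_flatMap]
    rw [bstep, List.flatMap_map]
    apply flatMap_congr_mem
    intro j _
    have heq : ∀ d ∈ List.range alphabet.length,
        bdec alphabet w (n+1) (j * alphabet.length + d)
          = bdec alphabet w n j ++ alphabet.getD d "" := by
      intro d hd
      have hdlt : d < alphabet.length := List.mem_range.mp hd
      rw [bdec_succ, Nat.mul_comm j alphabet.length]
      rw [Nat.mul_add_div hm, Nat.div_eq_of_lt hdlt, Nat.add_zero,
          Nat.mul_add_mod, Nat.mod_eq_of_lt hdlt]
    rw [List.map_congr_left heq, map_range_getD]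

lemma bdec_levels (alphabet : List String) (w : String) :
    ∀ n : Nat, (List.range (alphabet.length ^ n)).map (bdec alphabet w n)
      = (bstep alphabet)^[n] [w] := by
  intro n
  induction n with
  | zero => simp [List.range_one, bdec_zero]
  | succ m ih => rw [bdec_level, ih, Function.iterate_succ_apply']

-- ===== VERDICT (by name: the statement is the Claim_ definition above) =====
theorem gen_words_spec : Claim_equal_gen_words := by
  intro alphabet k w _ hpre
  obtain ⟨hle, hor⟩ := hpre
  show gen_words alphabet k w = gen_words_alt alphabet k w
  unfold gen_words gen_words_alt
  rw [show ((List.range (alphabet.length ^ (k - (w.length : Int)).toNat)).map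
        (fun i => w ++ String.join ((bdigits alphabet alphabet.length (k - (w.length : Int)).toNat i []).reverse)))
      = (bstep alphabet)^[(k - (w.length : Int)).toNat] [w] from
    bdec_levels alphabet w (k - (w.length : Int)).toNat]
  cases hor with
  | inl hk =>
    simp [genA, hk.symm]
  | inr hlet =>
    apply genA_eq alphabet k hlet
    omega
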